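-- pv_equiv track=rewrite | github.com/madhadron/seqlabd | seqlablib/contig.py | canny_mask
-- ===== SOURCE A (Python) =====
-- def find_steps(bs):
--     ups = []
--     downs = []
--     for i in range(len(bs)-1):
--         if bs[i] and not(bs[i+1]):
--             downs.append(i)
--         elif not(bs[i]) and bs[i+1]:
--             ups.append(i+1)
--         else:
--             pass
--     return (ups,downs)
--
-- def canny_mask(vals, high_threshold=40, low_threshold=10):
--     mask = [c >= high_threshold for c in vals]
--     N = len(vals)
--     ups, downs = find_steps(mask)
--     for i in ups:
--         assert i > 0 and i < N
--         j = i-1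
--         while j >= 0:
--             if vals[j] >= low_threshold:
--                 mask[j] = True
--                 j -= 1
--             else:
--                 break
--     for i in downs:
--         assert i >= 0 and i < N-1
--         j = i+1
--         while j < N:
--             if vals[j] >= low_threshold:
--                 mask[j] = True
--                 j += 1
--             else:
--                 break
--     return mask
-- ===== SOURCE B (Python) =====
-- def canny_mask(vals, high_threshold=40, low_threshold=10):
--     # Single pass over maximal runs of values >= low_threshold: a whole run is
--     # True iff it contains a value >= high_threshold; values below low_threshold
--     # are True iff they are >= high_threshold on their own.
--     n = len(vals)
--     mask = []
--     i = 0
--     while i < n: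
--         if vals[i] < low_threshold:
--             mask.append(vals[i] >= high_threshold)
--             i += 1
--         else:
--             j = i
--             has_high = False
--             while j < n and vals[j] >= low_threshold:
--                 if vals[j] >= high_threshold:
--                     has_high = True
--                 j += 1
--             mask.extend([has_high] * (j - i))
--             i = j
--     return mask
-- ===== Notes on version B (the rewrite author's own statement) =====
-- stated objective: alternative
-- what changed: Replaces the edge-list plus per-edge backward/forward region-growing loops by a single left-to-right pass over maximal runs of values >= low_threshold, marking a whole run True iff it contains a value >= high_threshold.
import Mathlib
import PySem

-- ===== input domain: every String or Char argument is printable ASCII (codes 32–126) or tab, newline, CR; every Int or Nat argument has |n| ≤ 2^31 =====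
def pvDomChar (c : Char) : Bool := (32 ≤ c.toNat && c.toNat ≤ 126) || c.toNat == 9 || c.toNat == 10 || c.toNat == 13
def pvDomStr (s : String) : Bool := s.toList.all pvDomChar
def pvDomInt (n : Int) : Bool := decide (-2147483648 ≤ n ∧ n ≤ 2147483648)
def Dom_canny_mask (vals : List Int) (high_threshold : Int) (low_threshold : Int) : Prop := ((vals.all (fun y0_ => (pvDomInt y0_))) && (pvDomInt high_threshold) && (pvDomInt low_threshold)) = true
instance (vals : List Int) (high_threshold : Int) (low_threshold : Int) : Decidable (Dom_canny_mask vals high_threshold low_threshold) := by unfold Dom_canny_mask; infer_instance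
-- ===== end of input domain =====

-- B replaces A's edge lists + per-edge region-growing while-loops by one left-to-right
-- pass over maximal runs of values ≥ low_threshold (objective: alternative algorithm,
-- same values everywhere).

-- ===== PORT A =====
-- find_steps: foldl over range(len(bs)-1), appending to ups/downs exactly as A does
def find_steps (bs : List Bool) : List Nat × List Nat :=
  (List.range (bs.length - 1)).foldl
    (fun ud i =>
      if bs.getD i false && !(bs.getD (i+1) false) then (ud.1, ud.2 ++ [i])
      else if !(bs.getD i false) && bs.getD (i+1) false then (ud.1 ++ [i+1], ud.2)
      else ud)
    ([], [])

-- the `while j >= 0: if vals[j] >= low: mask[j] = True; j -= 1 else break` loop of A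
def markLeft (vals : List Int) (low : Int) (mask : List Bool) (j : Nat) : List Bool :=
  if low ≤ vals.getD j 0 then
    if j = 0 then mask.set j true
    else markLeft vals low (mask.set j true) (j - 1)
  else mask
termination_by j
decreasing_by omega

-- the `while j < N: if vals[j] >= low: mask[j] = True; j += 1 else break` loop of A
def markRight (vals : List Int) (low : Int) (mask : List Bool) (j : Nat) : List Bool :=
  if j < vals.length then
    if low ≤ vals.getD j 0 then markRight vals low (mask.set j true) (j + 1)
    else mask
  else mask
termination_by vals.length - j
decreasing_by omega

def canny_mask (vals : List Int) (high_threshold : Int) (low_threshold : Int) : List Bool :=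
  let mask0 := vals.map (fun c => decide (high_threshold ≤ c))
  let ud := find_steps mask0
  let mask1 := ud.1.foldl (fun m i => markLeft vals low_threshold m (i - 1)) mask0
  ud.2.foldl (fun m i => markRight vals low_threshold m (i + 1)) mask1

-- ===== PORT B =====
-- the inner `while j < n and vals[j] >= low: ...` scan: run length and has_high flag
def scanRun (low high : Int) : List Int → Nat × Bool
  | [] => (0, false)
  | v :: rest =>
    if low ≤ v then
      let p := scanRun low high rest
      (p.1 + 1, decide (high ≤ v) || p.2)
    else (0, false)

def canny_mask_alt (vals : List Int) (high_threshold : Int) (low_threshold : Int) : List Bool :=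
  match vals with
  | [] => []
  | v :: rest =>
    if low_threshold ≤ v then
      let p := scanRun low_threshold high_threshold (v :: rest)
      List.replicate p.1 p.2 ++
        canny_mask_alt ((v :: rest).drop p.1) high_threshold low_threshold
    else
      decide (high_threshold ≤ v) :: canny_mask_alt rest high_threshold low_threshold
termination_by vals.length
decreasing_by
  · simp_all [scanRun]
  · simp


-- ===== PRECONDITION & SPEC =====
def Spec_canny_mask (vals : List Int) (high_threshold : Int) (low_threshold : Int) (out : List Bool) : Prop := out = canny_mask_alt vals high_threshold low_threshold
instance (vals : List Int) (high_threshold : Int) (low_threshold : Int) (out : List Bool) : Decidable (Spec_canny_mask vals high_threshold low_threshold out) := by unfold Spec_canny_mask; infer_instance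

-- ===== CLAIM (what is proved, stated in full; the proofs are below) =====
def Claim_equal_canny_mask : Prop := ∀ (vals : List Int) (high_threshold : Int) (low_threshold : Int), Dom_canny_mask vals high_threshold low_threshold → Spec_canny_mask vals high_threshold low_threshold (canny_mask vals high_threshold low_threshold)


-- ===== LEMMAS AND PROOFS =====

theorem scanRun_fst_le (low high : Int) (l : List Int) : (scanRun low high l).1 ≤ l.length := by
  induction l with
  | nil => simp [scanRun]
  | cons v rest ih =>
    simp only [scanRun]
    split
    · simp; omega
    · simp


-- value of vals at index t (indices used by both programs are always in range)
def gv (vals : List Int) (t : Nat) : Int := vals.getD t 0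

-- the shared pointwise specification: position k is masked iff it is >= hi itself,
-- or some position h holding a >= hi value is connected to k through >= lo values
def sp (vals : List Int) (hi lo : Int) (k : Nat) : Prop :=
  hi ≤ gv vals k ∨ ∃ h, h < vals.length ∧ hi ≤ gv vals h ∧
    ∀ t, min k h ≤ t → t ≤ max k h → t ≠ h → lo ≤ gv vals t

theorem gv_cons_zero (v : Int) (rest : List Int) : gv (v :: rest) 0 = v := rfl
theorem gv_cons_succ (v : Int) (rest : List Int) (t : Nat) : gv (v :: rest) (t+1) = gv rest t := rfl
theorem gv_drop (vals : List Int) (r t : Nat) (h : r + t < vals.length) :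
    gv (vals.drop r) t = gv vals (r + t) := by
  unfold gv
  rw [List.getD_eq_getElem _ _ (by simp; omega), List.getD_eq_getElem _ _ h, List.getElem_drop]

-- ===== A-side characterization =====

theorem markLeft_length (vals : List Int) (low : Int) (m : List Bool) (j : Nat) :
    (markLeft vals low m j).length = m.length := by
  fun_induction markLeft vals low m j <;> simp_all

theorem markRight_length (vals : List Int) (low : Int) (m : List Bool) (j : Nat) :
    (markRight vals low m j).length = m.length := by
  fun_induction markRight vals low m j <;> simp_all

theorem getD_set_lt (m : List Bool) (j k : Nat) (hk : k < m.length) :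
    (m.set j true).getD k false = if j = k then true else m.getD k false := by
  rw [List.getD_eq_getElem _ _ (by simpa using hk), List.getElem_set]
  split
  · rfl
  · rw [List.getD_eq_getElem _ _ hk]

theorem markLeft_getD (vals : List Int) (low : Int) (j : Nat) (hj : j < vals.length)
    (k : Nat) (hk : k < vals.length) :
    ∀ m : List Bool, m.length = vals.length →
    ((markLeft vals low m j).getD k false = true ↔
      (m.getD k false = true ∨ (k ≤ j ∧ ∀ u, k ≤ u → u ≤ j → low ≤ gv vals u))) := by
  simp only [gv]
  revert hj
  induction j with
  | zero =>
    intro hj m hm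
    by_cases hv : low ≤ vals.getD 0 0
    · rw [markLeft, if_pos hv, if_pos rfl, getD_set_lt m 0 k (by omega)]
      constructor
      · intro hres
        by_cases hk0 : (0 : Nat) = k
        · refine Or.inr ⟨by omega, fun u h1 h2 => ?_⟩
          have hu : u = 0 := by omega
          rw [hu]; exact hv
        · rw [if_neg hk0] at hres; exact Or.inl hres
      · rintro (hm1 | ⟨hk0, _⟩)
        · split
          · rfl
          · exact hm1
        · rw [if_pos (by omega : (0:Nat) = k)]
    · rw [markLeft, if_neg hv]
      constructor
      · exact Or.inl
      · rintro (hm1 | ⟨hk0, hall⟩)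
        · exact hm1
        · exact absurd (hall 0 (by omega) (by omega)) hv
  | succ j' ih =>
    intro hj m hm
    by_cases hv : low ≤ vals.getD (j'+1) 0
    · rw [markLeft, if_pos hv, if_neg (Nat.succ_ne_zero j')]
      have hm' : (m.set (j'+1) true).length = vals.length := by simpa using hm
      rw [Nat.add_sub_cancel, ih (by omega) _ hm', getD_set_lt m (j'+1) k (by omega)]
      by_cases hkj : j' + 1 = k
      · rw [if_pos hkj]
        constructor
        · intro _
          refine Or.inr ⟨by omega, fun u h1 h2 => ?_⟩
          have hu : u = j' + 1 := by omega
          rw [hu]; exact hv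
        · intro _; exact Or.inl rfl
      · rw [if_neg hkj]
        constructor
        · rintro (h1 | ⟨h2, hall⟩)
          · exact Or.inl h1
          · refine Or.inr ⟨by omega, fun u h1 h2 => ?_⟩
            by_cases hu : u = j' + 1
            · rw [hu]; exact hv
            · exact hall u h1 (by omega)
        · rintro (h1 | ⟨h2, hall⟩)
          · exact Or.inl h1
          · exact Or.inr ⟨by omega, fun u h1 h2 => hall u h1 (by omega)⟩
    · rw [markLeft, if_neg hv]
      constructor
      · exact Or.inl
      · rintro (h1 | ⟨hk1, hall⟩)
        · exact h1
        · exact absurd (hall (j'+1) (by omega) (by omega)) hv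

theorem markRight_getD (vals : List Int) (low : Int) (k : Nat) (hk : k < vals.length) :
    ∀ j (m : List Bool), m.length = vals.length →
    ((markRight vals low m j).getD k false = true ↔
      (m.getD k false = true ∨ (j ≤ k ∧ ∀ u, j ≤ u → u ≤ k → low ≤ gv vals u))) := by
  simp only [gv]
  suffices H : ∀ d j (m : List Bool), vals.length - j ≤ d → m.length = vals.length →
      ((markRight vals low m j).getD k false = true ↔
        (m.getD k false = true ∨ (j ≤ k ∧ ∀ u, j ≤ u → u ≤ k → low ≤ vals.getD u 0))) by
    intro j m hm
    exact H (vals.length - j) j m le_rfl hm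
  intro d
  induction d with
  | zero =>
    intro j m hd hm
    rw [markRight, if_neg (by omega : ¬ j < vals.length)]
    constructor
    · exact Or.inl
    · rintro (h1 | ⟨h2, _⟩)
      · exact h1
      · omega
  | succ d' ih =>
    intro j m hd hm
    by_cases hjn : j < vals.length
    · by_cases hv : low ≤ vals.getD j 0
      · rw [markRight, if_pos hjn, if_pos hv,
          ih (j+1) _ (by omega) (by simpa using hm), getD_set_lt m j k (by omega)]
        by_cases hkj : j = k
        · rw [if_pos hkj]
          constructor
          · intro _
            refine Or.inr ⟨by omega, fun u h1 h2 => ?_⟩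
            have hu : u = j := by omega
            rw [hu]; exact hv
          · intro _; exact Or.inl rfl
        · rw [if_neg hkj]
          constructor
          · rintro (h1 | ⟨h2, hall⟩)
            · exact Or.inl h1
            · refine Or.inr ⟨by omega, fun u h1 h2 => ?_⟩
              by_cases hu : u = j
              · rw [hu]; exact hv
              · exact hall u (by omega) h2
          · rintro (h1 | ⟨h2, hall⟩)
            · exact Or.inl h1
            · exact Or.inr ⟨by omega, fun u h1 h2 => hall u (by omega) h2⟩
      · rw [markRight, if_pos hjn, if_neg hv]
        constructor
        · exact Or.inl
        · rintro (h1 | ⟨h2, hall⟩)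
          · exact h1
          · exact absurd (hall j le_rfl (by omega)) hv
    · rw [markRight, if_neg hjn]
      constructor
      · exact Or.inl
      · rintro (h1 | ⟨h2, _⟩)
        · exact h1
        · omega

theorem find_steps_aux (bs : List Bool) (l : List Nat) :
    ∀ ud : List Nat × List Nat,
    (l.foldl
      (fun ud i =>
        if bs.getD i false && !(bs.getD (i+1) false) then (ud.1, ud.2 ++ [i])
        else if !(bs.getD i false) && bs.getD (i+1) false then (ud.1 ++ [i+1], ud.2)
        else ud)
      ud) =
    (ud.1 ++ l.filterMap (fun i => if !(bs.getD i false) && bs.getD (i+1) false then some (i+1) else none),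
     ud.2 ++ l.filterMap (fun i => if bs.getD i false && !(bs.getD (i+1) false) then some i else none)) := by
  induction l with
  | nil => intro ud; simp
  | cons i l ih =>
    intro ud
    rw [List.foldl_cons, ih, List.filterMap_cons, List.filterMap_cons]
    by_cases h1 : (bs.getD i false && !(bs.getD (i+1) false)) = true
    · have h2 : ¬ ((!(bs.getD i false) && bs.getD (i+1) false) = true) := by
        revert h1; cases bs.getD i false <;> cases bs.getD (i+1) false <;> simp
      rw [if_pos h1, if_pos h1, if_neg h2]
      simp
    · rw [if_neg h1, if_neg h1]
      by_cases h2 : (!(bs.getD i false) && bs.getD (i+1) false) = true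
      · rw [if_pos h2, if_pos h2]
        simp
      · rw [if_neg h2, if_neg h2]

theorem mem_ups (bs : List Bool) (x : Nat) :
    x ∈ (find_steps bs).1 ↔
      ∃ i, i + 1 < bs.length ∧ x = i + 1 ∧ bs.getD i false = false ∧ bs.getD (i+1) false = true := by
  unfold find_steps
  rw [find_steps_aux bs (List.range (bs.length - 1)) ([], [])]
  simp only [List.nil_append, List.mem_filterMap, List.mem_range]
  constructor
  · rintro ⟨i, hi, hsome⟩
    by_cases hc : (!(bs.getD i false) && bs.getD (i+1) false) = true
    · rw [if_pos hc] at hsome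
      have hx : i + 1 = x := by injection hsome
      simp only [Bool.and_eq_true, Bool.not_eq_true'] at hc
      exact ⟨i, by omega, hx.symm, hc.1, hc.2⟩
    · rw [if_neg hc] at hsome; cases hsome
  · rintro ⟨i, hi, hx, h0, h1⟩
    refine ⟨i, by omega, ?_⟩
    rw [if_pos (by rw [h0, h1]; rfl), hx]

theorem mem_downs (bs : List Bool) (x : Nat) :
    x ∈ (find_steps bs).2 ↔
      x + 1 < bs.length ∧ bs.getD x false = true ∧ bs.getD (x+1) false = false := by
  unfold find_steps
  rw [find_steps_aux bs (List.range (bs.length - 1)) ([], [])]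
  simp only [List.nil_append, List.mem_filterMap, List.mem_range]
  constructor
  · rintro ⟨i, hi, hsome⟩
    by_cases hc : (bs.getD i false && !(bs.getD (i+1) false)) = true
    · rw [if_pos hc] at hsome
      have hx : i = x := by injection hsome
      simp only [Bool.and_eq_true, Bool.not_eq_true'] at hc
      subst hx
      exact ⟨by omega, hc.1, hc.2⟩
    · rw [if_neg hc] at hsome; cases hsome
  · rintro ⟨hi, h0, h1⟩
    refine ⟨x, by omega, ?_⟩
    rw [if_pos (by rw [h0, h1]; rfl)]

theorem foldl_markLeft_length (vals : List Int) (low : Int) (ups : List Nat) (m : List Bool) :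
    (ups.foldl (fun m i => markLeft vals low m (i - 1)) m).length = m.length := by
  induction ups generalizing m with
  | nil => rfl
  | cons i ups ih => rw [List.foldl_cons, ih, markLeft_length]

theorem foldl_markRight_length (vals : List Int) (low : Int) (downs : List Nat) (m : List Bool) :
    (downs.foldl (fun m i => markRight vals low m (i + 1)) m).length = m.length := by
  induction downs generalizing m with
  | nil => rfl
  | cons i downs ih => rw [List.foldl_cons, ih, markRight_length]

theorem foldl_markLeft_getD (vals : List Int) (low : Int) (k : Nat) (hk : k < vals.length)
    (ups : List Nat) (hb : ∀ i ∈ ups, 1 ≤ i ∧ i ≤ vals.length) :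
    ∀ m : List Bool, m.length = vals.length →
    ((ups.foldl (fun m i => markLeft vals low m (i - 1)) m).getD k false = true ↔
      (m.getD k false = true ∨
        ∃ i ∈ ups, k ≤ i - 1 ∧ ∀ u, k ≤ u → u ≤ i - 1 → low ≤ gv vals u)) := by
  induction ups with
  | nil => simp
  | cons i ups ih =>
    intro m hm
    obtain ⟨hi1, hi2⟩ := hb i List.mem_cons_self
    rw [List.foldl_cons,
      ih (fun x hx => hb x (List.mem_cons_of_mem i hx)) _ (by rw [markLeft_length]; exact hm),
      markLeft_getD vals low (i - 1) (by omega) k hk m hm, List.exists_mem_cons_iff]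
    tauto

theorem foldl_markRight_getD (vals : List Int) (low : Int) (k : Nat) (hk : k < vals.length)
    (downs : List Nat) :
    ∀ m : List Bool, m.length = vals.length →
    ((downs.foldl (fun m i => markRight vals low m (i + 1)) m).getD k false = true ↔
      (m.getD k false = true ∨
        ∃ i ∈ downs, i + 1 ≤ k ∧ ∀ u, i + 1 ≤ u → u ≤ k → low ≤ gv vals u)) := by
  induction downs with
  | nil => simp
  | cons i downs ih =>
    intro m hm
    rw [List.foldl_cons, ih _ (by rw [markRight_length]; exact hm),
      markRight_getD vals low k hk (i + 1) m hm, List.exists_mem_cons_iff]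
    tauto

theorem canny_len (vals : List Int) (hi lo : Int) :
    (canny_mask vals hi lo).length = vals.length := by
  simp only [canny_mask]
  rw [foldl_markRight_length, foldl_markLeft_length]
  simp

theorem mask0_getD (vals : List Int) (hi : Int) (t : Nat) (ht : t < vals.length) :
    (vals.map (fun c => decide (hi ≤ c))).getD t false = decide (hi ≤ gv vals t) := by
  rw [List.getD_eq_getElem _ _ (by simpa using ht), List.getElem_map]
  unfold gv
  rw [List.getD_eq_getElem _ _ ht]

theorem canny_mask_getD (vals : List Int) (hi lo : Int) (k : Nat) (hk : k < vals.length) :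
    ((canny_mask vals hi lo).getD k false = true ↔
      (hi ≤ gv vals k
      ∨ (∃ i, i + 1 < vals.length ∧ ¬ hi ≤ gv vals i ∧ hi ≤ gv vals (i+1) ∧ k ≤ i ∧
            ∀ u, k ≤ u → u ≤ i → lo ≤ gv vals u)
      ∨ (∃ i, i + 1 < vals.length ∧ hi ≤ gv vals i ∧ ¬ hi ≤ gv vals (i+1) ∧ i + 1 ≤ k ∧
            ∀ u, i + 1 ≤ u → u ≤ k → lo ≤ gv vals u))) := by
  have hlen0 : (vals.map (fun c => decide (hi ≤ c))).length = vals.length := by simp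
  have hb : ∀ x ∈ (find_steps (vals.map (fun c => decide (hi ≤ c)))).1, 1 ≤ x ∧ x ≤ vals.length := by
    intro x hx
    rw [mem_ups] at hx
    obtain ⟨i, hi1, rfl, -, -⟩ := hx
    rw [hlen0] at hi1
    omega
  simp only [canny_mask]
  rw [foldl_markRight_getD vals lo k hk _ _
      (by rw [foldl_markLeft_length]; exact hlen0),
    foldl_markLeft_getD vals lo k hk _ hb _ hlen0, mask0_getD vals hi k hk,
    decide_eq_true_eq]
  constructor
  · rintro ((h0 | ⟨x, hx, hkx, hP⟩) | ⟨x, hx, hxk, hP⟩)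
    · exact Or.inl h0
    · rw [mem_ups] at hx
      obtain ⟨i, hi1, rfl, hm0, hm1⟩ := hx
      rw [hlen0] at hi1
      rw [mask0_getD vals hi i (by omega)] at hm0
      rw [mask0_getD vals hi (i+1) (by omega)] at hm1
      refine Or.inr (Or.inl ⟨i, hi1, by simpa using hm0, by simpa using hm1, ?_, ?_⟩)
      · simpa using hkx
      · intro u h1 h2; exact hP u h1 (by omega)
    · rw [mem_downs] at hx
      obtain ⟨hi1, hm0, hm1⟩ := hx
      rw [hlen0] at hi1
      rw [mask0_getD vals hi x (by omega)] at hm0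
      rw [mask0_getD vals hi (x+1) (by omega)] at hm1
      exact Or.inr (Or.inr ⟨x, hi1, by simpa using hm0, by simpa using hm1, hxk, hP⟩)
  · rintro (h0 | ⟨i, hi1, hlo, hhi, hki, hP⟩ | ⟨i, hi1, hhi, hlo, hik, hP⟩)
    · exact Or.inl (Or.inl h0)
    · refine Or.inl (Or.inr ⟨i + 1, ?_, by simpa using hki, fun u h1 h2 => hP u h1 (by omega)⟩)
      rw [mem_ups]
      refine ⟨i, by rw [hlen0]; omega, rfl, ?_, ?_⟩
      · rw [mask0_getD vals hi i (by omega)]; simpa using hlo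
      · rw [mask0_getD vals hi (i+1) (by omega)]; simpa using hhi
    · refine Or.inr ⟨i, ?_, hik, hP⟩
      rw [mem_downs]
      refine ⟨by rw [hlen0]; omega, ?_, ?_⟩
      · rw [mask0_getD vals hi i (by omega)]; simpa using hhi
      · rw [mask0_getD vals hi (i+1) (by omega)]; simpa using hlo

theorem up_extract (vals : List Int) (hi lo : Int) (k : Nat) (hnk : ¬ hi ≤ gv vals k) :
    ∀ h, k < h → h < vals.length → hi ≤ gv vals h →
    (∀ t, k ≤ t → t ≤ h → t ≠ h → lo ≤ gv vals t) →
    ∃ i, i + 1 < vals.length ∧ ¬ hi ≤ gv vals i ∧ hi ≤ gv vals (i+1) ∧ k ≤ i ∧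
      ∀ u, k ≤ u → u ≤ i → lo ≤ gv vals u := by
  intro h
  induction h with
  | zero => omega
  | succ h' ih =>
    intro h1 h2 h3 h4
    by_cases hh' : hi ≤ gv vals h'
    · have hkh : k < h' := by
        rcases Nat.lt_or_ge k h' with h | h
        · exact h
        · exact absurd (by have : k = h' := by omega
                           rw [this]; exact hh') hnk
      exact ih hkh (by omega) hh' (fun t t1 t2 t3 => h4 t t1 (by omega) (by omega))
    · exact ⟨h', h2, hh', h3, by omega, fun u u1 u2 => h4 u u1 (by omega) (by omega)⟩

theorem down_extract (vals : List Int) (hi lo : Int) (k : Nat) (hk : k < vals.length)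
    (hnk : ¬ hi ≤ gv vals k) :
    ∀ d h, h + d = k → h < k → hi ≤ gv vals h →
    (∀ t, h ≤ t → t ≤ k → t ≠ h → lo ≤ gv vals t) →
    ∃ i, i + 1 < vals.length ∧ hi ≤ gv vals i ∧ ¬ hi ≤ gv vals (i+1) ∧ i + 1 ≤ k ∧
      ∀ u, i + 1 ≤ u → u ≤ k → lo ≤ gv vals u := by
  intro d
  induction d with
  | zero => omega
  | succ d' ih =>
    intro h hd hlt h3 h4
    by_cases hh : hi ≤ gv vals (h + 1)
    · have hhk : h + 1 < k := by
        rcases Nat.lt_or_ge (h + 1) k with h' | h'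
        · exact h'
        · exact absurd (by have : h + 1 = k := by omega
                           rw [this] at hh; exact hh) hnk
      exact ih (h + 1) (by omega) hhk hh (fun t t1 t2 t3 => h4 t (by omega) t2 (by omega))
    · exact ⟨h, by omega, h3, hh, by omega, fun u u1 u2 => h4 u (by omega) u2 (by omega)⟩

theorem canny_mask_sp (vals : List Int) (hi lo : Int) (k : Nat) (hk : k < vals.length) :
    ((canny_mask vals hi lo).getD k false = true ↔ sp vals hi lo k) := by
  rw [canny_mask_getD vals hi lo k hk]
  unfold sp
  constructor
  · rintro (h0 | ⟨i, hi1, hlo, hhi, hki, hP⟩ | ⟨i, hi1, hhi, hlo, hik, hP⟩)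
    · exact Or.inl h0
    · refine Or.inr ⟨i + 1, hi1, hhi, fun t ht1 ht2 ht3 => ?_⟩
      rw [Nat.min_eq_left (by omega)] at ht1
      rw [Nat.max_eq_right (by omega)] at ht2
      exact hP t ht1 (by omega)
    · refine Or.inr ⟨i, by omega, hhi, fun t ht1 ht2 ht3 => ?_⟩
      rw [Nat.min_eq_right (by omega)] at ht1
      rw [Nat.max_eq_left (by omega)] at ht2
      exact hP t (by omega) ht2
  · rintro (h0 | ⟨h, hhn, hhhi, hP⟩)
    · exact Or.inl h0
    · by_cases hk0 : hi ≤ gv vals k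
      · exact Or.inl hk0
      · rcases Nat.lt_or_ge k h with hlt | hge
        · refine Or.inr (Or.inl (up_extract vals hi lo k hk0 h hlt hhn hhhi ?_))
          intro t t1 t2 t3
          exact hP t (by rw [Nat.min_eq_left (by omega)]; exact t1)
            (by rw [Nat.max_eq_right (by omega)]; exact t2) t3
        · have hlt : h < k := by
            rcases Nat.lt_or_ge h k with h' | h'
            · exact h'
            · exact absurd (by have : h = k := by omega
                               rw [this] at hhhi; exact hhhi) hk0
          refine Or.inr (Or.inr (down_extract vals hi lo k hk hk0 (k - h) h (by omega) hlt hhhi ?_))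
          intro t t1 t2 t3
          exact hP t (by rw [Nat.min_eq_right (by omega)]; exact t1)
            (by rw [Nat.max_eq_left (by omega)]; exact t2) t3

-- ===== B-side characterization =====

theorem scanRun_run (low high : Int) (l : List Int) :
    ∀ t < (scanRun low high l).1, low ≤ gv l t := by
  induction l with
  | nil => simp [scanRun]
  | cons v rest ih =>
    intro t ht
    simp only [scanRun] at ht
    split at ht
    · cases t with
      | zero => simpa [gv_cons_zero] using ‹low ≤ v›
      | succ t' => rw [gv_cons_succ]; exact ih t' (by simpa using ht)
    · simp at ht

theorem scanRun_boundary (low high : Int) (l : List Int)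
    (h : (scanRun low high l).1 < l.length) : ¬ low ≤ gv l (scanRun low high l).1 := by
  induction l with
  | nil => simp at h
  | cons v rest ih =>
    by_cases hv : low ≤ v
    · simp only [scanRun, if_pos hv] at h ⊢
      rw [gv_cons_succ]
      exact ih (by simpa using h)
    · simpa [scanRun, if_neg hv, gv_cons_zero] using hv

theorem scanRun_snd (low high : Int) (l : List Int) :
    ((scanRun low high l).2 = true ↔ ∃ t < (scanRun low high l).1, high ≤ gv l t) := by
  induction l with
  | nil => simp [scanRun]
  | cons v rest ih =>
    simp only [scanRun]
    split
    · simp only [Bool.or_eq_true, decide_eq_true_eq, ih]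
      constructor
      · rintro (hv | ⟨t, ht, hht⟩)
        · exact ⟨0, by omega, by simpa [gv_cons_zero] using hv⟩
        · exact ⟨t + 1, by omega, by simpa [gv_cons_succ] using hht⟩
      · rintro ⟨t, ht, hht⟩
        cases t with
        | zero => exact Or.inl (by simpa [gv_cons_zero] using hht)
        | succ t' => exact Or.inr ⟨t', by omega, by simpa [gv_cons_succ] using hht⟩
    · simp

theorem alt_length (vals : List Int) (hi lo : Int) :
    (canny_mask_alt vals hi lo).length = vals.length := by
  fun_induction canny_mask_alt vals hi lo with
  | case1 => rfl
  | case2 v rest hv ih =>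
    have hle := scanRun_fst_le lo hi (v :: rest)
    simp only [List.length_append, List.length_replicate, List.length_cons, ih,
      List.length_drop] at *
    omega
  | case3 v rest hv ih => simp [ih]

theorem sp_zero_low (vals : List Int) (hi lo : Int) (hv : ¬ lo ≤ gv vals 0) :
    (sp vals hi lo 0 ↔ hi ≤ gv vals 0) := by
  unfold sp
  constructor
  · rintro (h0 | ⟨h, hn, hhi, hP⟩)
    · exact h0
    · by_cases hh : h = 0
      · rw [hh] at hhi; exact hhi
      · exact absurd (hP 0 (by omega) (by omega) (by omega)) hv
  · exact Or.inl

theorem sp_shift_one (v : Int) (rest : List Int) (hi lo : Int) (hv : ¬ lo ≤ v)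
    (k : Nat) :
    (sp (v :: rest) hi lo (k+1) ↔ sp rest hi lo k) := by
  unfold sp
  constructor
  · rintro (h0 | ⟨h, hn, hhi, hP⟩)
    · exact Or.inl (by rw [← gv_cons_succ v rest k]; exact h0)
    · match h with
      | 0 =>
        have hlk : lo ≤ gv (v :: rest) (k+1) := hP (k+1) (by omega) (by omega) (by omega)
        rw [gv_cons_zero] at hhi
        rw [gv_cons_succ] at hlk
        exact Or.inl (by omega)
      | h' + 1 =>
        refine Or.inr ⟨h', by simpa using hn, by rw [← gv_cons_succ v rest h']; exact hhi,
          fun t t1 t2 t3 => ?_⟩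
        rw [← gv_cons_succ v rest t]
        exact hP (t+1) (by omega) (by omega) (by omega)
  · rintro (h0 | ⟨h, hn, hhi, hP⟩)
    · exact Or.inl (by rw [gv_cons_succ]; exact h0)
    · refine Or.inr ⟨h + 1, by simpa using hn, by rw [gv_cons_succ]; exact hhi,
        fun t t1 t2 t3 => ?_⟩
      match t, (by omega : 1 ≤ t) with
      | t' + 1, _ =>
        rw [gv_cons_succ]
        exact hP t' (by omega) (by omega) (by omega)

theorem sp_run_lt (vals : List Int) (hi lo : Int) (r : Nat)
    (hrun : ∀ t < r, lo ≤ gv vals t) (hbd : r < vals.length → ¬ lo ≤ gv vals r)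
    (hrn : r ≤ vals.length) (k : Nat) (hk : k < r) :
    (sp vals hi lo k ↔ ∃ t < r, hi ≤ gv vals t) := by
  unfold sp
  constructor
  · rintro (h0 | ⟨h, hn, hhi, hP⟩)
    · exact ⟨k, hk, h0⟩
    · by_cases hhr : h < r
      · exact ⟨h, hhr, hhi⟩
      · by_cases hhr' : h = r
        · have hb : ¬ lo ≤ gv vals r := hbd (by omega)
          have hlk : lo ≤ gv vals k := hrun k hk
          rw [hhr'] at hhi
          exact ⟨k, hk, by omega⟩
        · exact absurd (hP r (by omega) (by omega) (by omega)) (hbd (by omega))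
  · rintro ⟨t, ht, hhi⟩
    exact Or.inr ⟨t, by omega, hhi, fun u u1 u2 u3 => hrun u (by omega)⟩

theorem sp_run_ge (vals : List Int) (hi lo : Int) (r : Nat)
    (hbd : r < vals.length → ¬ lo ≤ gv vals r)
    (k : Nat) (hk1 : r ≤ k) (hk : k < vals.length) :
    (sp vals hi lo k ↔ sp (vals.drop r) hi lo (k - r)) := by
  unfold sp
  rw [List.length_drop]
  constructor
  · rintro (h0 | ⟨h, hn, hhi, hP⟩)
    · refine Or.inl ?_
      rw [gv_drop vals r (k - r) (by omega), show r + (k - r) = k from by omega]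
      exact h0
    · have hhr : r ≤ h := by
        by_contra hhr
        exact absurd (hP r (by omega) (by omega) (by omega)) (hbd (by omega))
      refine Or.inr ⟨h - r, by omega, ?_, fun t t1 t2 t3 => ?_⟩
      · rw [gv_drop vals r (h - r) (by omega), show r + (h - r) = h from by omega]
        exact hhi
      · rw [gv_drop vals r t (by omega)]
        exact hP (r + t) (by omega) (by omega) (by omega)
  · rintro (h0 | ⟨h, hn, hhi, hP⟩)
    · refine Or.inl ?_
      rw [gv_drop vals r (k - r) (by omega), show r + (k - r) = k from by omega] at h0
      exact h0
    · refine Or.inr ⟨h + r, by omega, ?_, fun t t1 t2 t3 => ?_⟩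
      · rw [gv_drop vals r h (by omega), show r + h = h + r from by omega] at hhi
        exact hhi
      · have ht : r ≤ t := by omega
        have := hP (t - r) (by omega) (by omega) (by omega)
        rw [gv_drop vals r (t - r) (by omega), show r + (t - r) = t from by omega] at this
        exact this

theorem alt_sp (hi lo : Int) :
    ∀ vals (k : Nat), k < vals.length →
      ((canny_mask_alt vals hi lo).getD k false = true ↔ sp vals hi lo k) := by
  suffices H : ∀ n (vals : List Int) (k : Nat), vals.length ≤ n → k < vals.length →
      ((canny_mask_alt vals hi lo).getD k false = true ↔ sp vals hi lo k) by
    intro vals k hk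
    exact H vals.length vals k le_rfl hk
  intro n
  induction n with
  | zero => intro vals k h1 h2; omega
  | succ n ih =>
    intro vals k h1 h2
    match vals with
    | [] => simp at h2
    | v :: rest =>
      by_cases hv : lo ≤ v
      · rw [canny_mask_alt, if_pos hv]
        have hr1 : 1 ≤ (scanRun lo hi (v :: rest)).1 := by
          simp [scanRun, hv]
        have hrle := scanRun_fst_le lo hi (v :: rest)
        have hrun := scanRun_run lo hi (v :: rest)
        have hbd : (scanRun lo hi (v :: rest)).1 < (v :: rest).length →
            ¬ lo ≤ gv (v :: rest) (scanRun lo hi (v :: rest)).1 :=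
          fun h => scanRun_boundary lo hi (v :: rest) h
        by_cases hkr : k < (scanRun lo hi (v :: rest)).1
        · rw [List.getD_append _ _ _ _ (by simpa using hkr), List.getD_replicate _ hkr,
            scanRun_snd lo hi (v :: rest),
            sp_run_lt (v :: rest) hi lo (scanRun lo hi (v :: rest)).1 hrun hbd hrle k hkr]
        · rw [List.getD_append_right _ _ _ _ (by simpa using hkr), List.length_replicate,
            ih ((v :: rest).drop (scanRun lo hi (v :: rest)).1) _
              (by simp only [List.length_drop]; simp only [List.length_cons] at h1 ⊢; omega)
              (by simp only [List.length_drop]; omega),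
            sp_run_ge (v :: rest) hi lo (scanRun lo hi (v :: rest)).1 hbd k (by omega) h2]
      · rw [canny_mask_alt, if_neg hv]
        match k with
        | 0 =>
          rw [sp_zero_low (v :: rest) hi lo (by rw [gv_cons_zero]; exact hv), gv_cons_zero]
          simp
        | k' + 1 =>
          have hk' : k' < rest.length := by simpa using h2
          rw [show ((decide (hi ≤ v) :: canny_mask_alt rest hi lo).getD (k' + 1) false) =
              (canny_mask_alt rest hi lo).getD k' false from rfl,
            ih rest k' (by simpa using Nat.le_of_succ_le_succ h1) hk',
            sp_shift_one v rest hi lo hv k']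


-- ===== VERDICT (by name: the statement is the Claim_ definition above) =====
theorem canny_mask_spec : Claim_equal_canny_mask := by
  intro vals hi lo _
  unfold Spec_canny_mask
  apply List.ext_getElem
  · rw [canny_len, alt_length]
  · intro k h1 h2
    rw [← List.getD_eq_getElem _ false h1, ← List.getD_eq_getElem _ false h2]
    have hk : k < vals.length := by rw [canny_len] at h1; exact h1
    rw [Bool.eq_iff_iff, canny_mask_sp vals hi lo k hk, alt_sp hi lo vals k hk]
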